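-- pv_equiv track=rewrite | github.com/Ch3m1stryK1ng/sourceagent | sourceagent/pipeline/phaseb_diagnostic_inputs.py | _dominant_check_strength
-- ===== SOURCE A (Python) =====
-- from typing import Any, Dict, Iterable, List, Mapping, Optional, Sequence, Tuple
--
-- def _dominant_check_strength(check_rows: Sequence[Mapping[str, Any]]) -> str:
--     rank = {"effective": 3, "weak": 2, "absent": 1, "unknown": 0}
--     best = "unknown"
--     best_rank = -1
--     for row in check_rows:
--         cur = str(row.get("strength", "") or "unknown").lower()
--         if rank.get(cur, 0) > best_rank:
--             best_rank = rank.get(cur, 0)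
--             best = cur
--     if not check_rows:
--         return "absent"
--     return best
-- ===== SOURCE B (Python) =====
-- def _dominant_check_strength(check_rows):
--     if not check_rows:
--         return "absent"
--     normed = [str(row.get("strength", "") or "unknown").lower() for row in check_rows]
--     for level in ("effective", "weak", "absent"):
--         if level in normed:
--             return level
--     return normed[0]
-- ===== Notes on version B (the rewrite author's own statement) =====
-- stated objective: alternative
-- what changed: Replaces the running-maximum scan with tracked best/best_rank state by a normalize-once pass followed by priority-ordered membership tests over the fixed level list, falling back to the first normalized value.
import Mathlib
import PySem

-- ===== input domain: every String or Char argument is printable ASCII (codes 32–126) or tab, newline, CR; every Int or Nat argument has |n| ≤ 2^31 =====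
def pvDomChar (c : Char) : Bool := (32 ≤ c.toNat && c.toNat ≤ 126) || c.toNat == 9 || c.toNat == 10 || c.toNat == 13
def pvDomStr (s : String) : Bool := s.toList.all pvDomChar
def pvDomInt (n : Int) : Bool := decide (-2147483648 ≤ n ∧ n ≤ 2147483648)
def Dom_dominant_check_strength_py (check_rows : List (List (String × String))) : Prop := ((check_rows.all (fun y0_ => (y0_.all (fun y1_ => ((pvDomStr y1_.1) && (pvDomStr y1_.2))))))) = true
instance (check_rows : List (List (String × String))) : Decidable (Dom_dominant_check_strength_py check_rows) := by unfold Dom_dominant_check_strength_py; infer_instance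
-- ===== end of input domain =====

-- B replaces A's running-maximum scan by a normalize-once pass plus priority-ordered
-- membership tests (objective: alternative decomposition, same cost).

-- ===== PORT A =====
-- rank = {"effective": 3, "weak": 2, "absent": 1, "unknown": 0}
def pvRank : PySem.Dict String Int :=
  PySem.Dict.mk [("effective", 3), ("weak", 2), ("absent", 1), ("unknown", 0)]

-- cur = str(row.get("strength", "") or "unknown").lower()
def pvCur (row : List (String × String)) : String :=
  let s := (PySem.Dict.mk row).getD "strength" ""
  PySem.Str.lower (if s = "" then "unknown" else s)

-- the body of A's for-loop, on the state (best, best_rank)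
def pvStepA (st : String × Int) (row : List (String × String)) : String × Int :=
  let cur := pvCur row
  if pvRank.getD cur 0 > st.2 then (cur, pvRank.getD cur 0) else st

def dominant_check_strength_py (check_rows : List (List (String × String))) : String :=
  let res := check_rows.foldl pvStepA ("unknown", -1)
  if check_rows = [] then "absent" else res.1

-- ===== PORT B =====
def dominant_check_strength_py_alt (check_rows : List (List (String × String))) : String :=
  match check_rows with
  | [] => "absent"
  | _ :: _ =>
    let normed := check_rows.map pvCur
    if normed.contains "effective" then "effective"
    else if normed.contains "weak" then "weak"
    else if normed.contains "absent" then "absent"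
    else normed.headD "unknown"

-- ===== PRECONDITION & SPEC =====
def Spec_dominant_check_strength_py (check_rows : List (List (String × String))) (out : String) : Prop := out = dominant_check_strength_py_alt check_rows
instance (check_rows : List (List (String × String))) (out : String) : Decidable (Spec_dominant_check_strength_py check_rows out) := by unfold Spec_dominant_check_strength_py; infer_instance

-- ===== CLAIM (what is proved, stated in full; the proofs are below) =====
def Claim_equal_dominant_check_strength_py : Prop := ∀ (check_rows : List (List (String × String))), Dom_dominant_check_strength_py check_rows → Spec_dominant_check_strength_py check_rows (dominant_check_strength_py check_rows)

-- ===== LEMMAS AND PROOFS =====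

-- closed form of the rank-dict lookup (proof helper)
def pvR (s : String) : Int :=
  if s = "effective" then 3 else if s = "weak" then 2 else if s = "absent" then 1 else 0

theorem pvRank_getD (s : String) : pvRank.getD s 0 = pvR s := by
  unfold pvRank pvR
  simp only [PySem.Dict.getD, PySem.Dict.get?, List.find?]
  by_cases h1 : s = "effective"
  · subst h1; simp
  · rw [show ("effective" == s) = false by simp [Ne.symm h1]]
    by_cases h2 : s = "weak"
    · subst h2; simp
    · rw [show ("weak" == s) = false by simp [Ne.symm h2]]
      by_cases h3 : s = "absent"
      · subst h3; simp
      · rw [show ("absent" == s) = false by simp [Ne.symm h3]]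
        by_cases h4 : s = "unknown"
        · subst h4; simp
        · rw [show ("unknown" == s) = false by simp [Ne.symm h4]]
          simp [h1, h2, h3]

theorem pvStepA_eq : pvStepA = fun (st : String × Int) row =>
    if pvR (pvCur row) > st.2 then (pvCur row, pvR (pvCur row)) else st := by
  funext st row
  simp [pvStepA, pvRank_getD]

set_option maxHeartbeats 1000000 in
theorem pvFold_main (l : List String) (b : String) :
    (l.foldl (fun st c => if pvR c > st.2 then (c, pvR c) else st) (b, pvR b)).1 =
      if b = "effective" ∨ l.contains "effective" then "effective"
      else if b = "weak" ∨ l.contains "weak" then "weak"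
      else if b = "absent" ∨ l.contains "absent" then "absent"
      else b := by
  induction l generalizing b with
  | nil =>
    simp only [List.foldl_nil, List.contains_eq_mem, List.mem_nil_iff]
    split_ifs with h1 h2 h3 <;> simp_all
  | cons c t ih =>
    simp only [List.foldl_cons]
    by_cases h : pvR c > pvR b
    · rw [if_pos h, ih]
      by_cases hc1 : c = "effective" <;> by_cases hc2 : c = "weak" <;> by_cases hc3 : c = "absent" <;>
        by_cases hb1 : b = "effective" <;> by_cases hb2 : b = "weak" <;> by_cases hb3 : b = "absent" <;>
        simp_all [pvR, eq_comm]
    · rw [if_neg h, ih]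
      by_cases hc1 : c = "effective" <;> by_cases hc2 : c = "weak" <;> by_cases hc3 : c = "absent" <;>
        by_cases hb1 : b = "effective" <;> by_cases hb2 : b = "weak" <;> by_cases hb3 : b = "absent" <;>
        simp_all [pvR, eq_comm]

theorem pvR_nonneg (s : String) : 0 ≤ pvR s := by
  unfold pvR; split_ifs <;> omega

-- ===== VERDICT (by name: the statement is the Claim_ definition above) =====
theorem dominant_check_strength_py_spec : Claim_equal_dominant_check_strength_py := by
  intro check_rows _
  unfold Spec_dominant_check_strength_py dominant_check_strength_py dominant_check_strength_py_alt
  cases check_rows with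
  | nil => simp
  | cons r rs =>
    simp only [List.foldl_cons, List.map_cons, List.headD_cons,
      if_neg (by simp : ¬ (r :: rs : List (List (String × String))) = [])]
    have h0 : pvStepA ("unknown", -1) r = (pvCur r, pvR (pvCur r)) := by
      rw [pvStepA_eq]
      exact if_pos (by have := pvR_nonneg (pvCur r); omega)
    rw [h0, pvStepA_eq]
    have hm := pvFold_main (rs.map pvCur) (pvCur r)
    rw [List.foldl_map] at hm
    rw [hm]
    simp only [List.contains_cons, Bool.or_eq_true, beq_iff_eq]
    by_cases h1 : pvCur r = "effective" <;> by_cases h2 : pvCur r = "weak" <;>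
      by_cases h3 : pvCur r = "absent" <;> simp_all [eq_comm]
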